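-- pv_equiv track=rewrite | github.com/luanakwon/Projects4Fun | nemologic/main.py | get_line_label
-- ===== SOURCE A (Python) =====
-- def get_line_label(line):
--     out = []
--     pxl_0 = 1
--     j_len = 0
--     for pxl in line:
--         # if this pixel is black
--         # inc len
--         if pxl == 0:
--             j_len += 1
--         # if this pixel is not black but last pixel is black
--         # write j_len and reset
--         elif pxl != 0 and pxl_0 == 0:
--             out.append(j_len)
--             j_len = 0
--         # if this pixel is not black and last pixel is not black
--         # do nothing
--         pxl_0 = pxl
--     # if last pixel is black, append len
--     if line[-1] == 0:
--         out.append(j_len)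
--
--     return out
-- ===== SOURCE B (Python) =====
-- def get_line_label(line):
--     # run-length encode the whole line, then keep the lengths of the zero runs
--     rle = []
--     for p in line:
--         if rle and rle[-1][0] == p:
--             rle[-1][1] += 1
--         else:
--             rle.append([p, 1])
--     return [c for v, c in rle if v == 0]
-- ===== Notes on version B (the rewrite author's own statement) =====
-- stated objective: simpler
-- what changed: Replaces A's prev-pixel/current-length state machine (with a trailing line[-1] check) by run-length encoding the line once and filtering out the lengths of the zero-valued runs.
import Mathlib
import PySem

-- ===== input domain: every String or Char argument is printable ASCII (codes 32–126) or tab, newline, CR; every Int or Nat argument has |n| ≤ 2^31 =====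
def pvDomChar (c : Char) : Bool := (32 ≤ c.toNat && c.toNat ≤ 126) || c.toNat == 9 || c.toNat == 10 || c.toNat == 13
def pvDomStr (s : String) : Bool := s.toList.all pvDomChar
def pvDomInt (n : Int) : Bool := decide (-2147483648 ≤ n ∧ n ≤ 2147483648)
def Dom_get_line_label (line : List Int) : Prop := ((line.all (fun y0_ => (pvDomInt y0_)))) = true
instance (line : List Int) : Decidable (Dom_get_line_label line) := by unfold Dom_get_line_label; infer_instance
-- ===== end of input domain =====

-- B replaces A's prev-pixel state machine by run-length encoding the line then filtering zero runs ("simpler").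

-- ===== PORT A =====
-- the for loop of A as structural recursion over the state (out, pxl_0, j_len)
def aLoop : List Int → List Int → Int → Int → (List Int × Int × Int)
  | [], out, pxl_0, j_len => (out, pxl_0, j_len)
  | pxl :: rest, out, pxl_0, j_len =>
    if pxl = 0 then aLoop rest out pxl (j_len + 1)
    else if pxl ≠ 0 ∧ pxl_0 = 0 then aLoop rest (out ++ [j_len]) pxl 0
    else aLoop rest out pxl j_len

def get_line_label (line : List Int) : List Int :=
  let s := aLoop line [] 1 0
  match PySem.List.pyGet? line (-1) with
  | none => s.1          -- unreachable under Pre_: Python raises IndexError on line[-1] here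
  | some x => if x = 0 then s.1 ++ [s.2.2] else s.1

-- ===== PORT B =====
-- Python appends to / mutates the END of rle; ported with the accumulator REVERSED
-- (head = rle[-1]), reversed back before the final filter — exact on every input.
def rleStep (acc : List (Int × Int)) (p : Int) : List (Int × Int) :=
  match acc with
  | (v, c) :: rest => if v = p then (v, c + 1) :: rest else (p, 1) :: (v, c) :: rest
  | [] => [(p, 1)]

def get_line_label_alt (line : List Int) : List Int :=
  ((line.foldl rleStep []).reverse.filter (fun q => q.1 = 0)).map Prod.snd

-- ===== PRECONDITION & SPEC =====
-- Pre_ excludes exactly the empty line, on which A raises IndexError (line[-1]).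
def Pre_get_line_label (line : List Int) : Prop := line ≠ []
instance (line : List Int) : Decidable (Pre_get_line_label line) := by unfold Pre_get_line_label; infer_instance
def pvWitness_get_line_label : List Int := ([0, 3, 0, 0])

def Spec_get_line_label (line : List Int) (out : List Int) : Prop := out = get_line_label_alt line
instance (line : List Int) (out : List Int) : Decidable (Spec_get_line_label line out) := by unfold Spec_get_line_label; infer_instance

-- ===== CLAIM (what is proved, stated in full; the proofs are below) =====
def Claim_equal_get_line_label : Prop := ∀ (line : List Int), Dom_get_line_label line → Pre_get_line_label line → Spec_get_line_label line (get_line_label line)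

-- ===== LEMMAS AND PROOFS =====

-- step lemmas for A's loop
lemma aLoop_cons_z {x : Int} (xs : List Int) (out : List Int) (p j : Int) (hx : x = 0) :
    aLoop (x :: xs) out p j = aLoop xs out x (j + 1) := by simp [aLoop, hx]

lemma aLoop_cons_nz_pz {x p : Int} (xs : List Int) (out : List Int) (j : Int)
    (hx : x ≠ 0) (hp : p = 0) :
    aLoop (x :: xs) out p j = aLoop xs (out ++ [j]) x 0 := by simp [aLoop, hx, hp]

lemma aLoop_cons_nz_nz {x p : Int} (xs : List Int) (out : List Int) (j : Int)
    (hx : x ≠ 0) (hp : p ≠ 0) :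
    aLoop (x :: xs) out p j = aLoop xs out x j := by simp [aLoop, hx, hp]

-- step lemmas for B's run-length accumulator
lemma rleStep_nil (p : Int) : rleStep [] p = [(p, 1)] := rfl
lemma rleStep_eq {v p : Int} (c : Int) (rest : List (Int × Int)) (h : v = p) :
    rleStep ((v, c) :: rest) p = (v, c + 1) :: rest := by simp [rleStep, h]
lemma rleStep_ne {v p : Int} (c : Int) (rest : List (Int × Int)) (h : v ≠ p) :
    rleStep ((v, c) :: rest) p = (p, 1) :: (v, c) :: rest := by simp [rleStep, h]

-- zero-run lengths read off an accumulator (in original order)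
def zrOf (acc : List (Int × Int)) : List Int :=
  (acc.reverse.filter (fun q => q.1 = 0)).map Prod.snd

lemma zrOf_cons (v c : Int) (rest : List (Int × Int)) :
    zrOf ((v, c) :: rest) = zrOf rest ++ (if v = 0 then [c] else []) := by
  simp [zrOf, List.filter_append, List.map_append]
  split_ifs with h <;> simp [h]

-- the state link between A's loop state and B's accumulator
def Link (p j : Int) (out : List Int) (acc : List (Int × Int)) : Prop :=
  if p = 0 then ∃ rest, acc = (0, j) :: rest ∧ zrOf rest = out
  else zrOf acc = out ∧ (acc = [] ∨ ∃ k rest, acc = (p, k) :: rest)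

-- main invariant: A's final answer (out, plus the pending run if the final prev pixel is 0)
-- equals the zero-run lengths of B's final accumulator
lemma main_inv (xs : List Int) : ∀ (out : List Int) (p j : Int) (acc : List (Int × Int)),
    (p ≠ 0 → j = 0) → Link p j out acc →
    (if (aLoop xs out p j).2.1 = 0 then (aLoop xs out p j).1 ++ [(aLoop xs out p j).2.2]
     else (aLoop xs out p j).1) = zrOf (xs.foldl rleStep acc) := by
  induction xs with
  | nil =>
    intro out p j acc hj hL
    simp only [aLoop, List.foldl]
    by_cases hp : p = 0
    · subst hp
      simp only [Link, reduceIte] at hL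
      obtain ⟨rest, rfl, hrest⟩ := hL
      simp [zrOf_cons, hrest]
    · simp only [Link, if_neg hp] at hL
      simp [hp, hL.1]
  | cons x xs ih =>
    intro out p j acc hj hL
    rw [show (x :: xs).foldl rleStep acc = xs.foldl rleStep (rleStep acc x) from rfl]
    by_cases hx : x = 0
    · subst hx
      rw [aLoop_cons_z xs out p j rfl]
      by_cases hp : p = 0
      · subst hp
        simp only [Link, reduceIte] at hL
        obtain ⟨rest, rfl, hrest⟩ := hL
        rw [rleStep_eq j rest rfl]
        exact ih out 0 (j + 1) _ (by simp)
          (by simp only [Link, reduceIte]; exact ⟨rest, rfl, hrest⟩)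
      · have hj0 : j = 0 := hj hp
        subst hj0
        simp only [Link, if_neg hp] at hL
        have hstep : rleStep acc 0 = (0, 1) :: acc := by
          rcases hL.2 with h | ⟨k, rest, rfl⟩
          · rw [h, rleStep_nil]
          · exact rleStep_ne k rest hp
        rw [hstep]
        exact ih out 0 (0 + 1) _ (by simp)
          (by simp only [Link, reduceIte]; exact ⟨acc, rfl, hL.1⟩)
    · by_cases hp : p = 0
      · subst hp
        rw [aLoop_cons_nz_pz xs out j hx rfl]
        simp only [Link, reduceIte] at hL
        obtain ⟨rest, rfl, hrest⟩ := hL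
        rw [rleStep_ne j rest (Ne.symm hx)]
        refine ih (out ++ [j]) x 0 _ (fun _ => rfl) ?_
        simp only [Link, if_neg hx]
        refine ⟨?_, Or.inr ⟨1, _, rfl⟩⟩
        rw [zrOf_cons, if_neg hx, zrOf_cons, if_pos rfl, hrest]
        simp
      · rw [aLoop_cons_nz_nz xs out j hx hp]
        simp only [Link, if_neg hp] at hL
        have hj0 : j = 0 := hj hp
        refine ih out x j _ (fun _ => hj0) ?_
        simp only [Link, if_neg hx]
        constructor
        · rcases hL.2 with h | ⟨k, rest, rfl⟩
          · rw [h, rleStep_nil, zrOf_cons, if_neg hx, ← hL.1, h]; simp [zrOf]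
          · by_cases hpx : p = x
            · rw [rleStep_eq k rest hpx, zrOf_cons, if_neg hp, ← hL.1,
                zrOf_cons, if_neg hp]
            · rw [rleStep_ne k rest hpx, zrOf_cons, if_neg hx, List.append_nil, hL.1]
        · rcases hL.2 with h | ⟨k, rest, rfl⟩
          · exact Or.inr ⟨1, [], by rw [h, rleStep_nil]⟩
          · by_cases hpx : p = x
            · refine Or.inr ⟨k + 1, rest, ?_⟩
              rw [rleStep_eq k rest hpx, hpx]
            · exact Or.inr ⟨1, _, rleStep_ne k rest hpx⟩

-- the final prev pixel of A's loop is the last element of the processed list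
lemma aLoop_prev (xs : List Int) : ∀ (out : List Int) (p j : Int),
    (aLoop xs out p j).2.1 = xs.getLastD p := by
  induction xs with
  | nil => intro out p j; simp [aLoop]
  | cons x xs ih =>
    intro out p j
    rw [List.getLastD_cons]
    by_cases hx : x = 0
    · rw [aLoop_cons_z xs out p j hx, ih]
    · by_cases hp : p = 0
      · rw [aLoop_cons_nz_pz xs out j hx hp, ih]
      · rw [aLoop_cons_nz_nz xs out j hx hp, ih]

-- ===== VERDICT (by name: the statement is the Claim_ definition above) =====
theorem get_line_label_spec : Claim_equal_get_line_label := by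
  intro line _ hpre
  unfold Spec_get_line_label get_line_label get_line_label_alt
  have hlast : PySem.List.pyGet? line (-1) = some (line.getLast hpre) := by
    rw [PySem.List.pyGet?_neg_one, List.getLast?_eq_getLast_of_ne_nil hpre]
  rw [hlast]
  have hmain := main_inv line [] 1 0 []
    (fun _ => rfl) (by simp only [Link]; norm_num; simp [zrOf])
  have hprev : (aLoop line [] 1 0).2.1 = line.getLast hpre := by
    rw [aLoop_prev, List.getLastD_eq_getLast?, List.getLast?_eq_getLast_of_ne_nil hpre,
      Option.getD_some]
  rw [hprev] at hmain
  exact hmain
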